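-- pv_equiv track=rewrite | github.com/yimcentral/dododocket | app_multisheet.py | generate_suffixes
-- ===== SOURCE A (Python) =====
-- from string import ascii_lowercase
--
-- def generate_suffixes(n):
--     suffixes = []
--     reps = 1
--     while len(suffixes) < n:
--         for ch in ascii_lowercase:
--             suffixes.append(ch * reps)
--             if len(suffixes) == n:
--                 break
--         reps += 1
--     return suffixes
-- ===== SOURCE B (Python) =====
-- from string import ascii_lowercase
--
-- def generate_suffixes(n):
--     # Dynamic programming on the output itself: the i-th suffix (for i >= 26)
--     # is the suffix 26 positions earlier extended by one more copy of its
--     # letter, i.e. out[i - 26] + out[i % 26]; the first 26 are the letters.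
--     out = []
--     for i in range(n):
--         out.append(ascii_lowercase[i] if i < 26 else out[i - 26] + out[i % 26])
--     return out
-- ===== Notes on version B (the rewrite author's own statement) =====
-- stated objective: alternative
-- what changed: Replaced A's while-loop with a reps counter, an inner alphabet scan and an early break by a dynamic-programming construction over the output itself: each suffix past the first 26 is built by concatenating two earlier output entries (out[i-26] + out[i%26]), so no repetition counter or per-block bookkeeping exists.
import Mathlib
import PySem

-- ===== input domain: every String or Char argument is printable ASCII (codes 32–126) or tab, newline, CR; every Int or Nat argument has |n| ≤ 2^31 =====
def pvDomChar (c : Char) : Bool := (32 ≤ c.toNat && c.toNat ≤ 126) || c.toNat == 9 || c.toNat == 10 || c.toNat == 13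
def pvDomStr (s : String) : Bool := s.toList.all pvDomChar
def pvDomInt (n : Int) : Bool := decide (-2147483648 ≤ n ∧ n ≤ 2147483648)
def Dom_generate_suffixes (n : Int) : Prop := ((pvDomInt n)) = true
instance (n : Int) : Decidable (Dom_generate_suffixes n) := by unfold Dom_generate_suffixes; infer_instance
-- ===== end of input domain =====

-- B replaces A's while-loop/reps-counter/early-break by a dynamic-programming pass that
-- builds each suffix from two earlier output entries; objective: alternative.

-- ascii_lowercase, iterated as its characters (used by both Pythons).
def pvLetters : List Char :=
  ['a','b','c','d','e','f','g','h','i','j','k','l','m','n','o','p','q','r','s','t','u','v','w','x','y','z']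

-- ===== PORT A =====
-- inner 'for ch in ascii_lowercase: append(ch * reps); if len == n: break'
def pvInnerA (cs : List Char) (reps : Nat) (n : Int) (acc : List String) : List String :=
  match cs with
  | [] => acc
  | c :: rest =>
    let acc' := acc ++ [String.ofList (List.replicate reps c)]
    if (acc'.length : Int) = n then acc' else pvInnerA rest reps n acc'

lemma pvInnerA_length_le (cs : List Char) (reps : Nat) (n : Int) (acc : List String) :
    acc.length ≤ (pvInnerA cs reps n acc).length := by
  induction cs generalizing acc with
  | nil => simp [pvInnerA]
  | cons c rest ih =>
    simp only [pvInnerA]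
    split
    · simp
    · exact le_trans (by simp) (ih _)

lemma pvInnerA_length_lt (c : Char) (rest : List Char) (reps : Nat) (n : Int) (acc : List String) :
    acc.length < (pvInnerA (c :: rest) reps n acc).length := by
  simp only [pvInnerA]
  split
  · simp
  · exact lt_of_lt_of_le (by simp) (pvInnerA_length_le _ _ _ _)

-- outer 'while len(suffixes) < n: … reps += 1'
def pvOuterA (reps : Nat) (n : Int) (acc : List String) : List String :=
  if h : (acc.length : Int) < n then
    pvOuterA (reps + 1) n (pvInnerA pvLetters reps n acc)
  else acc
termination_by (n - acc.length).toNat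
decreasing_by
  have := pvInnerA_length_lt 'a'
    ['b','c','d','e','f','g','h','i','j','k','l','m','n','o','p','q','r','s','t','u','v','w','x','y','z']
    reps n acc
  simp only [pvLetters]
  omega

def generate_suffixes (n : Int) : List String := pvOuterA 1 n []

-- ===== PORT B =====
-- loop body: out.append(ascii_lowercase[i] if i < 26 else out[i - 26] + out[i % 26]).
-- All three indexings are always in range in the loop (0 ≤ i < 26 in the first branch,
-- 0 ≤ i - 26 < len(out) and 0 ≤ i % 26 < 26 ≤ len(out) in the second), so pyGetD's
-- defaults are never used.
def pvStepB (acc : List String) (i : Int) : List String :=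
  acc ++ [if i < 26 then String.ofList [PySem.List.pyGetD pvLetters i 'a']
          else PySem.List.pyGetD acc (i - 26) "" ++ PySem.List.pyGetD acc (PySem.Int.mod i 26) ""]

def generate_suffixes_alt (n : Int) : List String :=
  (PySem.List.pyRange 0 n 1).foldl pvStepB []

-- ===== PRECONDITION & SPEC =====
def Spec_generate_suffixes (n : Int) (out : List String) : Prop := out = generate_suffixes_alt n
instance (n : Int) (out : List String) : Decidable (Spec_generate_suffixes n out) := by unfold Spec_generate_suffixes; infer_instance

-- ===== CLAIM (what is proved, stated in full; the proofs are below) =====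
def Claim_equal_generate_suffixes : Prop := ∀ (n : Int), Dom_generate_suffixes n → Spec_generate_suffixes n (generate_suffixes n)

-- ===== LEMMAS AND PROOFS =====

-- the common value: first m suffixes, in closed form (proof-only helper)
def pvElem (k : Nat) : String := String.ofList (List.replicate (k / 26 + 1) (pvLetters.getD (k % 26) 'a'))

def pvT (m : Nat) : List String := (List.range m).map pvElem

lemma pvT_length (m : Nat) : (pvT m).length = m := by simp [pvT]

lemma pvT_succ (m : Nat) : pvT (m + 1) = pvT m ++ [pvElem m] := by
  simp [pvT, List.range_succ]

lemma pvElem_eq (reps j : Nat) (h1 : 1 ≤ reps) (hj : j < 26) :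
    pvElem (26 * (reps - 1) + j) = String.ofList (List.replicate reps (pvLetters.getD j 'a')) := by
  have h2 : (26 * (reps - 1) + j) / 26 + 1 = reps := by omega
  have h3 : (26 * (reps - 1) + j) % 26 = j := by omega
  simp [pvElem, h2, h3]

lemma pv_inner_eq (n : Int) (hn : 0 ≤ n) :
    ∀ k j, j + k = 26 → ∀ reps, 1 ≤ reps → 26 * (reps - 1) + j < n.toNat →
    pvInnerA (pvLetters.drop j) reps n (pvT (26 * (reps - 1) + j)) =
      pvT (min n.toNat (26 * reps)) := by
  intro k
  induction k with
  | zero =>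
    intro j hj reps h1 hL
    have hj26 : j = 26 := by omega
    subst hj26
    have hdrop : pvLetters.drop 26 = [] := rfl
    rw [hdrop]
    have : min n.toNat (26 * reps) = 26 * (reps - 1) + 26 := by omega
    rw [pvInnerA, this]
  | succ k ih =>
    intro j hj reps h1 hL
    have hjlt : j < 26 := by omega
    have hjlen : j < pvLetters.length := by simp [pvLetters]; omega
    rw [List.drop_eq_getElem_cons hjlen]
    simp only [pvInnerA]
    have hget : pvLetters[j] = pvLetters.getD j 'a' := (List.getD_eq_getElem _ _ hjlen).symm
    have hstep : pvT (26 * (reps - 1) + j) ++ [String.ofList (List.replicate reps pvLetters[j])] =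
        pvT (26 * (reps - 1) + j + 1) := by
      rw [pvT_succ, pvElem_eq reps j h1 hjlt, hget]
    rw [hstep]
    by_cases hend : 26 * (reps - 1) + j + 1 = n.toNat
    · have hcond : ((pvT (26 * (reps - 1) + j + 1)).length : Int) = n := by
        rw [pvT_length]; omega
      rw [if_pos hcond]
      have : min n.toNat (26 * reps) = 26 * (reps - 1) + j + 1 := by omega
      rw [this]
    · have hcond : ¬ ((pvT (26 * (reps - 1) + j + 1)).length : Int) = n := by
        rw [pvT_length]; omega
      rw [if_neg hcond]
      have h2 : 26 * (reps - 1) + (j + 1) < n.toNat := by omega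
      have := ih (j + 1) (by omega) reps h1 h2
      rw [show 26 * (reps - 1) + j + 1 = 26 * (reps - 1) + (j + 1) by omega]
      exact this

lemma pv_outer_eq (n : Int) (hn : 0 ≤ n) :
    ∀ d reps, 1 ≤ reps → 26 * (reps - 1) ≤ n.toNat → n.toNat - 26 * (reps - 1) ≤ d →
    pvOuterA reps n (pvT (26 * (reps - 1))) = pvT n.toNat := by
  intro d
  induction d with
  | zero =>
    intro reps h1 hle hd
    have heq : 26 * (reps - 1) = n.toNat := by omega
    rw [pvOuterA, dif_neg (by rw [pvT_length]; omega), heq]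
  | succ d ih =>
    intro reps h1 hle hd
    by_cases heq : 26 * (reps - 1) = n.toNat
    · rw [pvOuterA, dif_neg (by rw [pvT_length]; omega), heq]
    · have hlt : 26 * (reps - 1) < n.toNat := by omega
      rw [pvOuterA, dif_pos (by rw [pvT_length]; omega)]
      have hinner := pv_inner_eq n hn 26 0 (by omega) reps h1 (by omega)
      simp only [List.drop_zero, Nat.add_zero] at hinner
      rw [hinner]
      by_cases hm : n.toNat ≤ 26 * reps
      · have : min n.toNat (26 * reps) = n.toNat := by omega
        rw [this, pvOuterA, dif_neg (by rw [pvT_length]; omega)]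
      · have hmin : min n.toNat (26 * reps) = 26 * reps := by omega
        have hrw : 26 * reps = 26 * ((reps + 1) - 1) := by omega
        rw [hmin, hrw]
        exact ih (reps + 1) (by omega) (by omega) (by omega)

-- B's loop body, applied to the first k suffixes at index k, appends exactly the (k+1)-st.
lemma pvStepB_eq (k : Nat) : pvStepB (pvT k) (k : Int) = pvT (k + 1) := by
  rw [pvT_succ]
  unfold pvStepB
  congr 1
  by_cases hk : k < 26
  · rw [if_pos (by exact_mod_cast hk)]
    have h0 : k / 26 = 0 := by omega
    have hm : k % 26 = k := by omega
    simp [pvElem, h0, hm, PySem.List.pyGetD_natCast]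
  · rw [if_neg (by omega)]
    have h26 : (k : Int) - 26 = ((k - 26 : Nat) : Int) := by omega
    have hmod : PySem.Int.mod (k : Int) 26 = ((k % 26 : Nat) : Int) := by
      simp [PySem.Int.mod, Int.fmod_eq_emod]
    rw [h26, hmod]
    simp only [PySem.List.pyGetD_natCast, pvT,
      PySem.List.getD_map_range pvElem k (k - 26) "" (by omega),
      PySem.List.getD_map_range pvElem k (k % 26) "" (by omega)]
    have e1 : (k - 26) % 26 = k % 26 := by omega
    have e2 : (k % 26) / 26 = 0 := by omega
    have e3 : (k % 26) % 26 = k % 26 := by omega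
    have e4 : k / 26 + 1 = (k - 26) / 26 + 1 + 1 := by omega
    have hcat : ∀ xs ys : List Char,
        String.ofList xs ++ String.ofList ys = String.ofList (xs ++ ys) := by simp
    simp only [pvElem, e1, e2, e3, e4, hcat]
    congr 1
    simp [List.replicate_succ']

lemma pvB_fold (m : Nat) :
    (PySem.List.pyRange 0 (m : Int) 1).foldl pvStepB [] = pvT m := by
  induction m with
  | zero => rw [PySem.List.pyRange_one_eq_nil (by omega)]; rfl
  | succ m ih =>
    rw [show ((m + 1 : Nat) : Int) = (m : Int) + 1 by push_cast; ring,
      PySem.List.pyRange_one_succ_right (by omega), List.foldl_append, ih]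
    simpa using pvStepB_eq m

lemma pv_alt_eq (n : Int) (hn : 0 ≤ n) : generate_suffixes_alt n = pvT n.toNat := by
  unfold generate_suffixes_alt
  have h := pvB_fold n.toNat
  rw [show ((n.toNat : Nat) : Int) = n by omega] at h
  exact h

lemma pv_main (n : Int) : generate_suffixes n = generate_suffixes_alt n := by
  by_cases hn : 0 ≤ n
  · rw [pv_alt_eq n hn]
    unfold generate_suffixes
    have h0 : pvT 0 = [] := rfl
    have := pv_outer_eq n hn n.toNat 1 (by omega) (by omega) (by omega)
    simpa [h0] using this
  · unfold generate_suffixes generate_suffixes_alt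
    rw [pvOuterA, dif_neg (by simp; omega), PySem.List.pyRange_one_eq_nil (by omega)]
    rfl

-- ===== VERDICT (by name: the statement is the Claim_ definition above) =====
theorem generate_suffixes_spec : Claim_equal_generate_suffixes := by
  intro n _
  exact pv_main n
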